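-- pv_equiv track=rewrite | github.com/ekaterinatretyak/A-new-day-is-a-new-opportunity | myTokenizer.py | strspl
-- ===== SOURCE A (Python) =====
-- def strspl(s):
--     """This function divides a string in a list of alphabetical substrings."""
--
--     l = []  # An array for our future list of substrings
--     if len(s) == 0:
--         l = []
--
--     # Check each object(index,character) whether it is alpha or not
--     else:
--         for j,c in enumerate(s):
--         # If there's an alphabetical character
--         # it can be the first char in the string
--         # or the previous character isn't alpha
--         # Write it as a beginning of a substring
--             if c.isalpha() and (j == 0 or not s[j-1].isalpha()):
--                 index = j
--
--         # We should know that we haven't reached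
--         # the last char in the string
--             if (j + 1) <= (len(s) - 1) and c.isalpha() and not s[j + 1].isalpha():
--                 # Define where the end of alpha substring
--                 # and we add it to our list
--                 if c.isalpha() and not s[j+1].isalpha():
--                     l.append(s[index:j+1])
--         # Otherwise, we've reached the last char in the string
--         # and should add it to our list
--         if c.isalpha():
--             l.append(s[index:])
--     return l
-- ===== SOURCE B (Python) =====
-- from itertools import groupby
--
-- def strspl(s):
--     """This function divides a string in a list of alphabetical substrings."""
--     return [''.join(g) for is_alpha, g in groupby(s, str.isalpha) if is_alpha]
-- ===== Notes on version B (the rewrite author's own statement) =====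
-- stated objective: idiomatic
-- what changed: Replaces A's index bookkeeping with previous/next-character look-ahead inside an enumerate loop by itertools.groupby(s, str.isalpha), keeping only the alphabetic groups.
import Mathlib
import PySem

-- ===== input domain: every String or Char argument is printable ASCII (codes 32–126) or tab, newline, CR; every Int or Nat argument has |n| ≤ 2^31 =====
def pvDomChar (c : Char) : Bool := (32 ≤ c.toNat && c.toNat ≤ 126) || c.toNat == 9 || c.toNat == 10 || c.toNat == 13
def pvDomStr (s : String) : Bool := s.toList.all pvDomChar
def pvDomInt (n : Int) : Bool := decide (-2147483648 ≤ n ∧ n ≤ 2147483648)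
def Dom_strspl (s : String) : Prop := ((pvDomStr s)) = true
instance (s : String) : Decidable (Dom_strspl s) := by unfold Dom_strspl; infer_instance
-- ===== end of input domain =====

-- B replaces A's index tracking and look-ahead boundary tests with grouping
-- consecutive characters by isalpha and keeping the alphabetic groups (idiomatic).


-- ===== PORT A =====
-- One loop iteration of A's `for j, c in enumerate(s)`, over state (l, index).
-- Python's `index` is unassigned before the first alphabetic character; A never
-- reads it before assigning it, so the initial value 0 here is never consulted.
def strsplStep (cs : List Char) (acc : List String × Int) (jc : Int × Char) : List String × Int :=
  let l := acc.1
  let index := acc.2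
  let j := jc.1
  let c := jc.2
  let index :=
    if PySem.Chars.isalpha c &&
        (j == 0 || !(match PySem.List.pyGet? cs (j - 1) with
                     | some p => PySem.Chars.isalpha p
                     | none => false)) then j else index
  let nextAlpha :=
    (match PySem.List.pyGet? cs (j + 1) with
     | some p => PySem.Chars.isalpha p
     | none => false)
  let l :=
    if decide (j + 1 ≤ (cs.length : Int) - 1) && PySem.Chars.isalpha c && !nextAlpha then
      if PySem.Chars.isalpha c && !nextAlpha then
        l ++ [String.ofList (PySem.List.slice cs (some index) (some (j + 1)))]
      else l
    else l
  (l, index)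

def strspl (s : String) : List String :=
  let cs := s.toList
  if cs.length = 0 then []
  else
    let r := (PySem.List.enumerate cs 0).foldl (strsplStep cs) ([], 0)
    -- after the loop, Python's `c` holds the last character of s
    match cs.getLast? with
    | some c =>
        if PySem.Chars.isalpha c then
          r.1 ++ [String.ofList (PySem.List.slice cs (some r.2) none)]
        else r.1
    | none => r.1

-- ===== PORT B =====
-- itertools.groupby(s, str.isalpha): each group is the maximal run of characters
-- with the same isalpha value; B keeps (joined) exactly the alphabetic groups.
def strsplAltGo : List Char → List String
  | [] => []
  | c :: rest =>
    let g := rest.takeWhile (fun d => PySem.Chars.isalpha d == PySem.Chars.isalpha c)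
    let rest' := rest.dropWhile (fun d => PySem.Chars.isalpha d == PySem.Chars.isalpha c)
    if PySem.Chars.isalpha c then String.ofList (c :: g) :: strsplAltGo rest'
    else strsplAltGo rest'
  termination_by cs => cs.length
  decreasing_by
    all_goals
      have := List.length_dropWhile_le (fun d => PySem.Chars.isalpha d == PySem.Chars.isalpha c) rest
      simp only [List.length_cons]
      omega

def strspl_alt (s : String) : List String := strsplAltGo s.toList

-- ===== PRECONDITION & SPEC =====
def Spec_strspl (s : String) (out : List String) : Prop := out = strspl_alt s
instance (s : String) (out : List String) : Decidable (Spec_strspl s out) := by unfold Spec_strspl; infer_instance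

-- ===== CLAIM (what is proved, stated in full; the proofs are below) =====
def Claim_equal_strspl : Prop := ∀ (s : String), Dom_strspl s → Spec_strspl s (strspl s)

-- ===== LEMMAS AND PROOFS =====

-- pvAlpha abbreviates the character test both programs branch on.
def pvAlpha (c : Char) : Bool := PySem.Chars.isalpha c

-- The (maximal) trailing alphabetic run of a list.
def pvTrail (xs : List Char) : List Char := (xs.reverse.takeWhile pvAlpha).reverse

-- The words A's loop appends while scanning `cs`, given the pending run `cur`
-- carried in from the already-scanned prefix.
def pvW : List Char → List Char → List (List Char)
  | _, [] => []
  | cur, c :: cs' =>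
    if pvAlpha c then
      (if (match cs'.head? with | some d => !pvAlpha d | none => false) = true
        then [cur ++ [c]] else []) ++ pvW (cur ++ [c]) cs'
    else pvW [] cs'

theorem pvTrail_nil : pvTrail [] = [] := rfl

theorem pvTrail_concat (xs : List Char) (c : Char) :
    pvTrail (xs ++ [c]) = if pvAlpha c then pvTrail xs ++ [c] else [] := by
  simp only [pvTrail, List.reverse_append, List.reverse_cons, List.reverse_nil, List.nil_append,
    List.cons_append, List.takeWhile_cons]
  split <;> simp

theorem pvTrail_length_le (xs : List Char) : (pvTrail xs).length ≤ xs.length := by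
  have := List.IsPrefix.length_le (List.takeWhile_prefix (l := xs.reverse) pvAlpha)
  simpa [pvTrail] using this

theorem pvTrail_suffix (xs : List Char) : pvTrail xs <:+ xs := by
  have h := List.reverse_suffix.mpr (List.takeWhile_prefix (l := xs.reverse) pvAlpha)
  simpa [pvTrail] using h

theorem pvTrail_drop (xs : List Char) :
    xs.drop (xs.length - (pvTrail xs).length) = pvTrail xs := by
  obtain ⟨t, ht⟩ := pvTrail_suffix xs
  generalize pvTrail xs = s at ht ⊢
  subst ht
  simp [List.length_append]

theorem pvTrail_of_all (xs : List Char) (h : ∀ x ∈ xs, pvAlpha x) : pvTrail xs = xs := by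
  have : List.takeWhile pvAlpha xs.reverse = xs.reverse :=
    List.takeWhile_eq_self_iff.mpr (by intro x hx; exact h x (List.mem_reverse.mp hx))
  simp [pvTrail, this]

theorem pvTrail_append_cons_of_neg (xs ys : List Char) (d : Char) (h : ¬ pvAlpha d = true) :
    pvTrail (xs ++ d :: ys) = pvTrail ys := by
  have hrev : (xs ++ d :: ys).reverse = ys.reverse ++ d :: xs.reverse := by simp
  simp only [pvTrail, hrev, List.takeWhile_append, List.takeWhile_cons, h]
  split
  · next hlen =>
      rw [List.IsPrefix.eq_of_length (List.takeWhile_prefix pvAlpha) hlen]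
      simp
  · rfl

theorem pvTrail_eq_nil_concat (xs : List Char) (c : Char) :
    pvTrail (xs ++ [c]) = [] ↔ ¬ pvAlpha c = true := by
  rw [pvTrail_concat]
  split
  · next h => simp [h]
  · next h => simp [h]

-- strsplAltGo consumes one maximal alphabetic run at a time.
theorem altGo_alpha_run (cur cs : List Char) (hne : cur ≠ [])
    (hall : ∀ x ∈ cur, pvAlpha x) :
    strsplAltGo (cur ++ cs)
      = String.ofList (cur ++ cs.takeWhile pvAlpha) :: strsplAltGo (cs.dropWhile pvAlpha) := by
  obtain ⟨a, cur', rfl⟩ := List.exists_cons_of_ne_nil hne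
  have ha : pvAlpha a = true := hall a (by simp)
  have hkey : (fun d => PySem.Chars.isalpha d == PySem.Chars.isalpha a) = pvAlpha := by
    funext d
    have : PySem.Chars.isalpha a = true := ha
    simp [pvAlpha, this]
  have hall' : ∀ x ∈ cur', pvAlpha x := fun x hx => hall x (by simp [hx])
  have htw : List.takeWhile pvAlpha (cur' ++ cs) = cur' ++ List.takeWhile pvAlpha cs := by
    rw [List.takeWhile_append, if_pos (by rw [List.takeWhile_eq_self_iff.mpr hall'])]
  have hdw : List.dropWhile pvAlpha (cur' ++ cs) = List.dropWhile pvAlpha cs := by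
    rw [List.dropWhile_append, if_pos (by simp [List.dropWhile_eq_nil_iff.mpr hall'])]
  show strsplAltGo (a :: (cur' ++ cs)) = _
  rw [strsplAltGo, hkey]
  simp only [pvAlpha] at ha
  rw [if_pos ha, htw, hdw]
  simp

theorem altGo_cons_of_neg (d : Char) (rest : List Char) (h : ¬ pvAlpha d = true) :
    strsplAltGo (d :: rest) = strsplAltGo rest := by
  have hd : PySem.Chars.isalpha d = false := by
    simpa [pvAlpha] using h
  cases rest with
  | nil => simp [strsplAltGo, hd]
  | cons e rest₂ =>
      have hkey : (fun x => PySem.Chars.isalpha x == PySem.Chars.isalpha d)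
          = (fun x => !pvAlpha x) := by
        funext x; simp [pvAlpha, hd]
      rw [strsplAltGo, hkey]
      rw [if_neg (by simp [hd])]
      by_cases he : pvAlpha e = true
      · rw [List.dropWhile_cons, if_neg (by simp [he])]
      · conv_rhs => rw [strsplAltGo]
        have hkey' : (fun x => PySem.Chars.isalpha x == PySem.Chars.isalpha e)
            = (fun x => !pvAlpha x) := by
          funext x
          have : PySem.Chars.isalpha e = false := by simpa [pvAlpha] using he
          simp [pvAlpha, this]
        rw [hkey']
        rw [if_neg (by simpa [pvAlpha] using he)]
        rw [List.dropWhile_cons, if_pos (by simp [he])]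

-- One iteration of A's loop, evaluated: at absolute position |pre| inside pre ++ c :: cs'.
theorem pv_step_eval (pre cs' : List Char) (c : Char) (l : List String) (index : Int)
    (hidx : pvTrail pre ≠ [] → index = (pre.length : Int) - ((pvTrail pre).length : Int)) :
    strsplStep (pre ++ c :: cs') (l, index) ((pre.length : Int), c)
      = (l ++ (if pvAlpha c && (match cs'.head? with | some d => !pvAlpha d | none => false)
               then [String.ofList (pvTrail pre ++ [c])] else []),
         if pvAlpha c then (pre.length : Int) - ((pvTrail pre).length : Int) else index) := by
  have hle := pvTrail_length_le pre
  have hnext : PySem.List.pyGet? (pre ++ c :: cs') ((pre.length : Int) + 1) = cs'.head? := by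
    have h1 : ((pre.length : Int) + 1) = (((pre ++ [c]).length : Nat) : Int) := by
      simp [List.length_append]
    rw [h1, PySem.List.pyGet?_natCast, show pre ++ c :: cs' = (pre ++ [c]) ++ cs' by simp,
      List.getElem?_append_right (Nat.le_refl _)]
    simp [List.head?_eq_getElem?]
  have hcond1 : (PySem.Chars.isalpha c &&
      (((pre.length : Int)) == 0 ||
        !(match PySem.List.pyGet? (pre ++ c :: cs') ((pre.length : Int) - 1) with
          | some p => PySem.Chars.isalpha p | none => false)))
      = (pvAlpha c && decide (pvTrail pre = [])) := by
    rcases List.eq_nil_or_concat pre with rfl | ⟨p₀, p, rfl⟩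
    · simp [pvAlpha, pvTrail]
    · simp only [List.concat_eq_append]
      have hk0 : ((((p₀ ++ [p]).length : Nat) : Int) == 0) = false := by
        rw [beq_eq_false_iff_ne]
        simp only [List.length_append, List.length_cons, List.length_nil]
        push_cast
        omega
      have hprev : PySem.List.pyGet? ((p₀ ++ [p]) ++ c :: cs')
          ((((p₀ ++ [p]).length : Nat) : Int) - 1) = some p := by
        have h1 : ((((p₀ ++ [p]).length : Nat) : Int) - 1) = ((p₀.length : Nat) : Int) := by
          simp [List.length_append]
        rw [h1, PySem.List.pyGet?_natCast,
          show (p₀ ++ [p]) ++ c :: cs' = p₀ ++ (p :: c :: cs') by simp,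
          List.getElem?_append_right (Nat.le_refl _)]
        simp
      rw [hk0, hprev]
      by_cases hp : PySem.Chars.isalpha p = true
      · simp [hp, pvTrail_eq_nil_concat, pvAlpha]
      · simp [hp, pvTrail_eq_nil_concat, pvAlpha]
  have hidx2 : (if pvTrail pre = [] then (pre.length : Int) else index)
      = (pre.length : Int) - ((pvTrail pre).length : Int) := by
    by_cases hT : pvTrail pre = []
    · simp [hT]
    · simp [hT, hidx hT]
  have hslice : PySem.List.slice (pre ++ c :: cs')
      (some ((pre.length : Int) - ((pvTrail pre).length : Int)))
      (some ((pre.length : Int) + 1)) = pvTrail pre ++ [c] := by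
    have h1 : (pre.length : Int) - ((pvTrail pre).length : Int)
        = ((pre.length - (pvTrail pre).length : Nat) : Int) := by
      rw [Nat.cast_sub hle]
    have h2 : (pre.length : Int) + 1 = ((pre.length + 1 : Nat) : Int) := by push_cast; ring
    rw [h1, h2, PySem.List.slice_natCast,
      List.drop_append_of_le_length (by omega), pvTrail_drop,
      show pre.length + 1 - (pre.length - (pvTrail pre).length) = (pvTrail pre).length + 1
        from by omega,
      List.take_append]
    simp
  have hlen2 : (((pre ++ c :: cs').length : Nat) : Int) = (pre.length : Int) + 1 + cs'.length := by
    simp [List.length_append]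
    ring
  unfold strsplStep
  simp only [hcond1, hnext, hlen2]
  cases cs' with
  | nil =>
      have hc2 : (decide ((pre.length : Int) + 1 ≤ (pre.length : Int) + 1 + ([] : List Char).length - 1)) = false := by
        simp
      simp only [hc2, List.head?_nil, Bool.false_and, Bool.and_false]
      by_cases hc : PySem.Chars.isalpha c = true
      · simp [hc, pvAlpha, hidx2]
      · have hc' : PySem.Chars.isalpha c = false := by simpa using hc
        simp [hc', pvAlpha]
  | cons d rest =>
      have hc2 : (decide ((pre.length : Int) + 1 ≤ (pre.length : Int) + 1 + ((d :: rest) : List Char).length - 1)) = true := by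
        simp
      simp only [hc2, List.head?_cons, Bool.true_and]
      by_cases hc : PySem.Chars.isalpha c = true
      · by_cases hd : PySem.Chars.isalpha d = true
        · simp [hc, hd, pvAlpha, hidx2]
        · have hd' : PySem.Chars.isalpha d = false := by simpa using hd
          simp [hc, hd', pvAlpha, hidx2, hslice]
      · have hc' : PySem.Chars.isalpha c = false := by simpa using hc
        simp [hc', pvAlpha]

-- A's loop over the suffix cs, started after scanning pre, appends exactly pvW (pvTrail pre) cs.
theorem pv_foldA (cs : List Char) : ∀ (pre : List Char) (l : List String) (index : Int),
    (pvTrail pre ≠ [] → index = (pre.length : Int) - ((pvTrail pre).length : Int)) →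
    ((PySem.List.enumerate cs (pre.length : Int)).foldl (strsplStep (pre ++ cs)) (l, index)).1
        = l ++ (pvW (pvTrail pre) cs).map String.ofList ∧
      (pvTrail (pre ++ cs) ≠ [] →
        ((PySem.List.enumerate cs (pre.length : Int)).foldl (strsplStep (pre ++ cs)) (l, index)).2
          = ((pre ++ cs).length : Int) - ((pvTrail (pre ++ cs)).length : Int)) := by
  induction cs with
  | nil =>
      intro pre l index hinv
      constructor
      · simp [PySem.List.enumerate_nil, pvW]
      · intro hne
        simp only [List.append_nil] at hne ⊢
        simp [PySem.List.enumerate_nil, hinv hne]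
  | cons c cs' ih =>
      intro pre l index hinv
      have hinv' : pvTrail (pre ++ [c]) ≠ [] →
          (if pvAlpha c then (pre.length : Int) - ((pvTrail pre).length : Int) else index)
            = (((pre ++ [c]).length : Nat) : Int) - ((pvTrail (pre ++ [c])).length : Int) := by
        intro hne
        rw [pvTrail_concat] at hne ⊢
        by_cases hc : pvAlpha c = true
        · simp only [hc, if_true] at hne ⊢
          simp only [List.length_append, List.length_cons, List.length_nil]
          push_cast
          ring
        · simp [hc] at hne
      rw [PySem.List.enumerate_cons, List.foldl_cons, pv_step_eval pre cs' c l index hinv]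
      have hre : pre ++ c :: cs' = (pre ++ [c]) ++ cs' := by simp
      rw [hre]
      have hkk : (pre.length : Int) + 1 = (((pre ++ [c]).length : Nat) : Int) := by
        simp [List.length_append]
      rw [hkk]
      obtain ⟨ih1, ih2⟩ := ih (pre ++ [c])
        (l ++ (if pvAlpha c && (match cs'.head? with | some d => !pvAlpha d | none => false)
               then [String.ofList (pvTrail pre ++ [c])] else []))
        (if pvAlpha c then (pre.length : Int) - ((pvTrail pre).length : Int) else index)
        hinv'
      refine ⟨?_, ih2⟩
      rw [ih1]
      by_cases hc : pvAlpha c = true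
      · rw [show pvW (pvTrail pre) (c :: cs')
            = (if (match cs'.head? with | some d => !pvAlpha d | none => false) = true
                then [pvTrail pre ++ [c]] else []) ++ pvW (pvTrail pre ++ [c]) cs'
            from by rw [pvW]; simp [hc]]
        rw [pvTrail_concat, if_pos hc]
        cases hh : (match cs'.head? with | some d => !pvAlpha d | none => false) <;>
          simp [hc]
      · rw [show pvW (pvTrail pre) (c :: cs') = pvW [] cs' from by rw [pvW]; simp [hc]]
        rw [pvTrail_concat, if_neg hc]
        simp [hc]

-- Base case of pv_main: no input left, only the pending run.
theorem pv_main_nil (cur : List Char) (hall : ∀ x ∈ cur, pvAlpha x) :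
    (if pvTrail cur = [] then ([] : List String) else [String.ofList (pvTrail cur)])
      = strsplAltGo cur := by
  rw [pvTrail_of_all cur hall]
  cases cur with
  | nil => simp [strsplAltGo]
  | cons a cur' =>
      rw [if_neg (by simp)]
      have h := altGo_alpha_run (a :: cur') [] (by simp) hall
      simp only [List.append_nil, List.takeWhile_nil, List.dropWhile_nil] at h
      rw [h]
      simp [strsplAltGo]

-- The flushed words plus the trailing run are exactly B's groups.
theorem pv_main : ∀ (n : Nat) (cs cur : List Char), cs.length ≤ n →
    (∀ x ∈ cur, pvAlpha x) →
    (cur = [] ∨ cs = [] ∨ (∃ d rest, cs = d :: rest ∧ pvAlpha d)) →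
    (pvW cur cs).map String.ofList ++
        (if pvTrail (cur ++ cs) = [] then [] else [String.ofList (pvTrail (cur ++ cs))])
      = strsplAltGo (cur ++ cs) := by
  intro n
  induction n with
  | zero =>
      intro cs cur hlen hall _
      have hnil : cs = [] := List.length_eq_zero_iff.mp (Nat.le_zero.mp hlen)
      subst hnil
      simpa [pvW] using pv_main_nil cur hall
  | succ n ih =>
      intro cs cur hlen hall hcond
      cases cs with
      | nil => simpa [pvW] using pv_main_nil cur hall
      | cons c cs' =>
          by_cases hc : pvAlpha c = true
          · cases cs' with
            | nil =>
                rw [show pvW cur [c] = [] from by rw [pvW]; simp [hc, pvW]]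
                have hall' : ∀ x ∈ cur ++ [c], pvAlpha x := by
                  intro x hx
                  rcases List.mem_append.mp hx with h | h
                  · exact hall x h
                  · simp at h; subst h; exact hc
                simpa [pvW] using pv_main_nil (cur ++ [c]) hall'
            | cons d rest =>
                have hall' : ∀ x ∈ cur ++ [c], pvAlpha x := by
                  intro x hx
                  rcases List.mem_append.mp hx with h | h
                  · exact hall x h
                  · simp at h; subst h; exact hc
                by_cases hd : pvAlpha d = true
                · rw [show pvW cur (c :: d :: rest) = pvW (cur ++ [c]) (d :: rest)
                      from by rw [pvW]; simp [hc, hd]]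
                  rw [show cur ++ c :: d :: rest = (cur ++ [c]) ++ (d :: rest) by simp]
                  exact ih (d :: rest) (cur ++ [c]) (by simpa using Nat.le_of_succ_le_succ hlen)
                    hall' (Or.inr (Or.inr ⟨d, rest, rfl, hd⟩))
                · rw [show pvW cur (c :: d :: rest) = (cur ++ [c]) :: pvW [] rest
                      from by rw [pvW, pvW]; simp [hc, hd]]
                  have htr : pvTrail (cur ++ c :: d :: rest) = pvTrail rest := by
                    rw [show cur ++ c :: d :: rest = (cur ++ [c]) ++ d :: rest by simp]
                    exact pvTrail_append_cons_of_neg (cur ++ [c]) rest d (by simp [hd])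
                  have haltr : strsplAltGo (cur ++ c :: d :: rest)
                      = String.ofList (cur ++ [c]) :: strsplAltGo rest := by
                    rw [show cur ++ c :: d :: rest = (cur ++ [c]) ++ (d :: rest) by simp]
                    rw [altGo_alpha_run (cur ++ [c]) (d :: rest) (by simp) hall']
                    rw [List.takeWhile_cons, if_neg (by simp [hd]),
                      List.dropWhile_cons, if_neg (by simp [hd])]
                    rw [altGo_cons_of_neg d rest hd]
                    simp
                  rw [htr, haltr]
                  have hrec := ih rest [] (by simp at hlen; omega) (by simp) (Or.inl rfl)
                  simp only [List.nil_append] at hrec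
                  simp [hrec]
          · have hcur : cur = [] := by
              rcases hcond with h | h | ⟨d, rest, heq, hda⟩
              · exact h
              · exact absurd h (by simp)
              · rw [List.cons_eq_cons] at heq
                exact absurd (heq.1 ▸ hda) hc
            subst hcur
            rw [show pvW [] (c :: cs') = pvW [] cs' from by rw [pvW]; simp [hc]]
            simp only [List.nil_append]
            have htr := pvTrail_append_cons_of_neg [] cs' c hc
            simp only [List.nil_append] at htr
            rw [htr, altGo_cons_of_neg c cs' hc]
            have hrec := ih cs' [] (by simp at hlen; omega) (by simp) (Or.inl rfl)
            simpa only [List.nil_append] using hrec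

-- ===== VERDICT (by name: the statement is the Claim_ definition above) =====
theorem strspl_spec : Claim_equal_strspl := by
  intro s _
  show strspl s = strspl_alt s
  unfold strspl strspl_alt
  generalize s.toList = cs
  by_cases h0 : cs.length = 0
  · have hnil : cs = [] := List.length_eq_zero_iff.mp h0
    subst hnil
    simp [strsplAltGo]
  · rw [if_neg h0]
    obtain ⟨p₀, p, rfl⟩ : ∃ p₀ p, cs = p₀ ++ [p] := by
      rcases List.eq_nil_or_concat cs with rfl | ⟨p₀, p, h⟩
      · exact absurd rfl h0
      · exact ⟨p₀, p, by simpa using h⟩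
    have hfold := pv_foldA (p₀ ++ [p]) [] [] 0 (by simp [pvTrail_nil])
    simp only [List.nil_append, List.length_nil, Nat.cast_zero, pvTrail_nil] at hfold
    obtain ⟨h1, h2⟩ := hfold
    have hmain := pv_main (p₀ ++ [p]).length (p₀ ++ [p]) [] (Nat.le_refl _)
      (by simp) (Or.inl rfl)
    simp only [List.nil_append] at hmain
    rw [List.getLast?_concat]
    by_cases hp : PySem.Chars.isalpha p = true
    · simp only [hp, if_true]
      have htrne : pvTrail (p₀ ++ [p]) ≠ [] := by
        rw [pvTrail_concat, if_pos (by exact hp)]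
        simp
      have hr2 := h2 htrne
      have hle := pvTrail_length_le (p₀ ++ [p])
      have hslice : PySem.List.slice (p₀ ++ [p])
          (some ((((p₀ ++ [p]).length : Nat) : Int) - ((pvTrail (p₀ ++ [p])).length : Int))) none
          = pvTrail (p₀ ++ [p]) := by
        rw [PySem.List.slice_from _ (by omega)]
        have ht : ((((p₀ ++ [p]).length : Nat) : Int) - ((pvTrail (p₀ ++ [p])).length : Int)).toNat
            = (p₀ ++ [p]).length - (pvTrail (p₀ ++ [p])).length := by omega
        rw [ht, pvTrail_drop]
      rw [h1, hr2, hslice]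
      rw [← hmain, if_neg htrne]
    · have hp' : PySem.Chars.isalpha p = false := by simpa using hp
      simp only [hp', Bool.false_eq_true, if_false]
      have htr : pvTrail (p₀ ++ [p]) = [] := by
        rw [pvTrail_concat, if_neg (by exact hp)]
      rw [h1, ← hmain, if_pos htr]
      simp
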